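-- pv_equiv track=rewrite | github.com/dplocki/advent-of-code | 2025/2025_10.py | find_the_lowest_buttons_press_count
-- ===== SOURCE A (Python) =====
-- from typing import Generator, Iterable, Tuple
-- from collections import deque
--
-- def find_the_lowest_buttons_press_count(goal: int, buttons_sets: Tuple[int, ...]) -> Tuple[int, ...]:
--     visited = set()
--     queue = deque([(0, tuple([0] * len(buttons_sets)))])
--
--     while queue:
--         current, buttons_pressed = queue.popleft()
--         if current in visited:
--             continue
--
--         if current == goal:
--             return buttons_pressed
--
--         visited.add(current)
--         button_pressed_list = list(buttons_pressed)
--         for index, buttons_set in enumerate(buttons_sets):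
--             button_pressed_list[index] += 1
--             queue.append((current ^ buttons_set, tuple(button_pressed_list)))
--             button_pressed_list[index] -= 1
--
--     raise Exception('Unexpected: unable to find the answer')
-- ===== SOURCE B (Python) =====
-- from collections import deque
--
--
-- def find_the_lowest_buttons_press_count(goal, buttons_sets):
--     # BFS over bare XOR states with parent pointers; the press-count vector is
--     # reconstructed once, by walking the parent chain from the goal back to 0.
--     if goal == 0:
--         return (0,) * len(buttons_sets)
--
--     seen = {0}
--     parent = {}
--     queue = deque([0])
--
--     while queue:
--         current = queue.popleft()
--         for index, button in enumerate(buttons_sets):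
--             nxt = current ^ button
--             if nxt not in seen:
--                 seen.add(nxt)
--                 parent[nxt] = (current, index)
--                 if nxt == goal:
--                     counts = [0] * len(buttons_sets)
--                     node = nxt
--                     while node != 0:
--                         node, pressed_index = parent[node]
--                         counts[pressed_index] += 1
--                     return tuple(counts)
--                 queue.append(nxt)
--
--     raise Exception('Unexpected: unable to find the answer')
-- ===== Notes on version B (the rewrite author's own statement) =====
-- stated objective: faster
-- what changed: Replaces A's BFS that carries a full press-count tuple in every queue entry (copied per edge) and deduplicates at dequeue with a BFS over bare XOR states using a parent-pointer dict and mark-on-enqueue; the count vector is built once at the end by walking the parent chain from the goal back to 0.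
import Mathlib
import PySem

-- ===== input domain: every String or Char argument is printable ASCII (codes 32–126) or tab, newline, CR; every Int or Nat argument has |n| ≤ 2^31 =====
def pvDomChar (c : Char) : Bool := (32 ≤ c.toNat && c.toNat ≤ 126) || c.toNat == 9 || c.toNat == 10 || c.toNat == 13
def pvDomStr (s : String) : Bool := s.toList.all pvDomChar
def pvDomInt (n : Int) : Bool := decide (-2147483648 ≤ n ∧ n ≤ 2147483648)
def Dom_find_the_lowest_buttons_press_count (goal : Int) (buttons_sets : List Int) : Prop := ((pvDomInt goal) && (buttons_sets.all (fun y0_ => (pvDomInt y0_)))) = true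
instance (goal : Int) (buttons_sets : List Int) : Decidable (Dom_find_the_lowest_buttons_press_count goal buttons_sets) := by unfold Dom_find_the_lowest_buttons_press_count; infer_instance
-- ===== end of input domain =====

-- B replaces A's BFS, which carries a full press-count tuple in every queue entry (one O(B)
-- tuple copy per edge) and deduplicates at dequeue, by a BFS over bare XOR states with a
-- parent-pointer dict; the count vector is built once by walking the parent chain from the goal.

-- Termination cap for the Lean ports only: the visited/seen collections are duplicate-free
-- lists of ints, and under Dom all reachable states fit in [-2^32, 2^32), so their length
-- never reaches pvCap.
def pvCap : Nat := 1099511627776  -- 2^40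

-- ===== PORT A =====
-- children appended by A's inner for-loop: (current ^ b, pressed with index-th entry incremented)
def pvChildrenA (buttons_sets : List Int) (current : Int) (pressed : List Int) : List (Int × List Int) :=
  (PySem.List.enumerate buttons_sets).map (fun ib =>
    (PySem.Int.bxor current ib.2,
     PySem.List.pySetD pressed ib.1 (PySem.List.pyGetD pressed ib.1 0 + 1)))

def pvRunA (goal : Int) (buttons_sets : List Int) (queue : List (Int × List Int))
    (visited : PySem.Set Int) : List Int :=
  match queue with
  | [] => []  -- Python raises here; excluded by Pre_
  | (current, pressed) :: rest =>
    if hvis : PySem.Set.contains visited current = true then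
      pvRunA goal buttons_sets rest visited
    else if current = goal then pressed
    else if hcap : pvCap ≤ visited.length then []  -- termination guard, never reached (see lemmas)
    else pvRunA goal buttons_sets (rest ++ pvChildrenA buttons_sets current pressed)
           (PySem.Set.add visited current)
termination_by (pvCap - visited.length, queue.length)
decreasing_by
  · exact Prod.Lex.right _ (by simp)
  · have hnm : current ∉ visited := fun hm => hvis ((PySem.Set.contains_iff _ _).mpr hm)
    have h1 : (PySem.Set.add visited current).length = visited.length + 1 := by
      rw [PySem.Set.add_of_not_mem hnm]; simp
    exact Prod.Lex.left _ _ (by omega)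

def find_the_lowest_buttons_press_count (goal : Int) (buttons_sets : List Int) : List Int :=
  pvRunA goal buttons_sets [(0, List.replicate buttons_sets.length 0)] PySem.Set.empty

-- ===== PORT B =====
-- counts[i] += 1 in B's reconstruction loop
def pvBump (counts : List Int) (i : Int) : List Int :=
  PySem.List.pySetD counts i (PySem.List.pyGetD counts i 0 + 1)

-- B's reconstruction loop: while node != 0: node, i = parent[node]; counts[i] += 1.
-- fuel is a termination guard only, never reached on runs from the entry point; the
-- `none` branch is Python's KeyError, also unreachable on runs from the entry point.
def pvRebuild (parent : PySem.Dict Int (Int × Int)) : Nat → Int → List Int → List Int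
  | 0, _, counts => counts
  | fuel + 1, node, counts =>
    if node = 0 then counts
    else
      match PySem.Dict.get? parent node with
      | some pi => pvRebuild parent fuel pi.1 (pvBump counts pi.2)
      | none => counts

-- B's inner for-loop over enumerate(buttons_sets): Sum.inl = early return of the counts,
-- Sum.inr = the updated (queue, seen, parent) handed back to the while-loop.
def pvInnerB (goal : Int) (n : Nat) (current : Int) :
    List (Int × Int) → List Int → PySem.Set Int → PySem.Dict Int (Int × Int) →
    (List Int) ⊕ (List Int × PySem.Set Int × PySem.Dict Int (Int × Int))
  | [], queue, seen, parent => Sum.inr (queue, seen, parent)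
  | ib :: rest, queue, seen, parent =>
    let nxt := PySem.Int.bxor current ib.2
    if PySem.Set.contains seen nxt = true then pvInnerB goal n current rest queue seen parent
    else
      let seen' := PySem.Set.add seen nxt
      let parent' := PySem.Dict.insert parent nxt (current, ib.1)
      if nxt = goal then
        Sum.inl (pvRebuild parent' (PySem.Dict.size parent' + 1) nxt (List.replicate n 0))
      else pvInnerB goal n current rest (queue ++ [nxt]) seen' parent'

-- shape of the inner loop's Sum.inr result (cited by pvRunB's termination proof)
theorem pvInnerB_shape (goal : Int) (n : Nat) (current : Int) :
    ∀ (l : List (Int × Int)) (queue : List Int) (seen : PySem.Set Int)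
      (parent : PySem.Dict Int (Int × Int)) (q' : List Int) (s' : PySem.Set Int)
      (p' : PySem.Dict Int (Int × Int)),
      pvInnerB goal n current l queue seen parent = Sum.inr (q', s', p') →
      ∃ ks : List Int, q' = queue ++ ks ∧ s' = seen ++ ks := by
  intro l
  induction l with
  | nil =>
    intro queue seen parent q' s' p' h
    simp only [pvInnerB, Sum.inr.injEq, Prod.mk.injEq] at h
    exact ⟨[], by simp [← h.1, ← h.2.1]⟩
  | cons ib rest ih =>
    intro queue seen parent q' s' p' h
    simp only [pvInnerB] at h
    by_cases hc : PySem.Set.contains seen (PySem.Int.bxor current ib.2) = true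
    · rw [if_pos hc] at h
      exact ih queue seen parent q' s' p' h
    · rw [if_neg hc] at h
      have hnm : PySem.Int.bxor current ib.2 ∉ seen := fun hm =>
        hc ((PySem.Set.contains_iff _ _).mpr hm)
      by_cases hg : PySem.Int.bxor current ib.2 = goal
      · rw [if_pos hg] at h; exact absurd h (by simp)
      · rw [if_neg hg] at h
        obtain ⟨ks, hq, hs⟩ := ih _ _ _ _ _ _ h
        refine ⟨PySem.Int.bxor current ib.2 :: ks, ?_, ?_⟩
        · rw [hq]; simp
        · rw [hs, PySem.Set.add_of_not_mem hnm]; simp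

def pvRunB (goal : Int) (buttons_sets : List Int) (queue : List Int)
    (seen : PySem.Set Int) (parent : PySem.Dict Int (Int × Int)) : List Int :=
  match queue with
  | [] => []  -- Python raises here; excluded by Pre_
  | current :: rest =>
    if hcap : pvCap ≤ seen.length then []  -- termination guard, never reached (see lemmas)
    else
      match h : pvInnerB goal buttons_sets.length current
          (PySem.List.enumerate buttons_sets) rest seen parent with
      | Sum.inl counts => counts
      | Sum.inr qsp => pvRunB goal buttons_sets qsp.1 qsp.2.1 qsp.2.2
termination_by (pvCap - seen.length, queue.length)
decreasing_by
  obtain ⟨ks, hq, hs⟩ := pvInnerB_shape _ _ _ _ _ _ _ _ _ _ h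
  rcases ks with _ | ⟨x, ks'⟩
  · rw [hq, hs]
    simp only [List.append_nil]
    exact Prod.Lex.right _ (by simp)
  · rw [hs]
    exact Prod.Lex.left _ _ (by simp only [List.length_append, List.length_cons]; omega)

def find_the_lowest_buttons_press_count_alt (goal : Int) (buttons_sets : List Int) : List Int :=
  if goal = 0 then List.replicate buttons_sets.length 0
  else pvRunB goal buttons_sets [0] (PySem.Set.ofList [0]) PySem.Dict.empty

-- ===== PRECONDITION & SPEC =====
-- Pre_ excludes exactly the inputs on which Python A (and Python B) raise:
-- goals that are not an XOR of any subset of the buttons, i.e. unreachable goals.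
def Pre_find_the_lowest_buttons_press_count (goal : Int) (buttons_sets : List Int) : Prop :=
  ∃ l ∈ buttons_sets.sublists, l.foldl PySem.Int.bxor 0 = goal
instance (goal : Int) (buttons_sets : List Int) : Decidable (Pre_find_the_lowest_buttons_press_count goal buttons_sets) := by unfold Pre_find_the_lowest_buttons_press_count; infer_instance

def pvWitness_find_the_lowest_buttons_press_count : Int × List Int := (3, [1, 2])

def Spec_find_the_lowest_buttons_press_count (goal : Int) (buttons_sets : List Int) (out : List Int) : Prop := out = find_the_lowest_buttons_press_count_alt goal buttons_sets
instance (goal : Int) (buttons_sets : List Int) (out : List Int) : Decidable (Spec_find_the_lowest_buttons_press_count goal buttons_sets out) := by unfold Spec_find_the_lowest_buttons_press_count; infer_instance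

-- ===== CLAIM (what is proved, stated in full; the proofs are below) =====
def Claim_equal_find_the_lowest_buttons_press_count : Prop := ∀ (goal : Int) (buttons_sets : List Int), Dom_find_the_lowest_buttons_press_count goal buttons_sets → Pre_find_the_lowest_buttons_press_count goal buttons_sets → Spec_find_the_lowest_buttons_press_count goal buttons_sets (find_the_lowest_buttons_press_count goal buttons_sets)

-- ===== LEMMAS AND PROOFS =====

theorem pvContains_false {s : PySem.Set Int} {x : Int} (hm : x ∉ s) :
    PySem.Set.contains s x = false := by
  rcases h : PySem.Set.contains s x with _ | _
  · rfl
  · exact absurd ((PySem.Set.contains_iff _ _).mp h) hm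

-- all states stay in [-2^32, 2^32) under Dom
def pvInR (x : Int) : Prop := -4294967296 ≤ x ∧ x < 4294967296

theorem pvInR_bxor {a b : Int} (ha : pvInR a) (hb : pvInR b) : pvInR (PySem.Int.bxor a b) := by
  obtain ⟨ha1, ha2⟩ := ha
  obtain ⟨hb1, hb2⟩ := hb
  have key : ∀ m n : Nat, m < 4294967296 → n < 4294967296 → m ^^^ n < 4294967296 := by
    intro m n hmm hnn
    have h32 : (4294967296 : Nat) = 2 ^ 32 := by norm_num
    rw [h32] at hmm hnn ⊢
    exact Nat.xor_lt_two_pow hmm hnn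
  simp only [PySem.Int.bxor]
  split_ifs with h1 h2 h2
  · have hc := key a.toNat b.toNat (by omega) (by omega)
    constructor <;> omega
  · have hc := key a.toNat (-b - 1).toNat (by omega) (by omega)
    constructor <;> omega
  · have hc := key (-a - 1).toNat b.toNat (by omega) (by omega)
    constructor <;> omega
  · have hc := key (-a - 1).toNat (-b - 1).toNat (by omega) (by omega)
    constructor <;> omega

theorem pvLen_lt_cap (l : List Int) (hn : l.Nodup) (hr : ∀ x ∈ l, pvInR x) :
    l.length < pvCap := by
  have hcard : l.toFinset.card = l.length := List.toFinset_card_of_nodup hn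
  have hsub : l.toFinset ⊆ Finset.Icc (-4294967296 : Int) 4294967295 := by
    intro x hx
    rw [List.mem_toFinset] at hx
    obtain ⟨h1, h2⟩ := hr x hx
    rw [Finset.mem_Icc]
    exact ⟨h1, by omega⟩
  have hle := Finset.card_le_card hsub
  rw [Int.card_Icc] at hle
  unfold pvCap
  omega

-- `pvSift q seen`: the subsequence of queue q kept by first-occurrence-of-an-unseen-state
def pvSift : List (Int × List Int) → PySem.Set Int → List (Int × List Int)
  | [], _ => []
  | (s, t) :: rest, seen =>
    if PySem.Set.contains seen s = true then pvSift rest seen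
    else (s, t) :: pvSift rest (seen ++ [s])

theorem pvSift_append (q1 q2 : List (Int × List Int)) :
    ∀ s : PySem.Set Int, pvSift (q1 ++ q2) s =
      pvSift q1 s ++ pvSift q2 (s ++ (pvSift q1 s).map Prod.fst) := by
  induction q1 with
  | nil => intro s; simp [pvSift]
  | cons e rest ih =>
    intro s
    obtain ⟨a, t⟩ := e
    by_cases hm : a ∈ s
    · simp only [List.cons_append, pvSift, (PySem.Set.contains_iff _ _).mpr hm, if_true]
      exact ih s
    · simp only [List.cons_append, pvSift, pvContains_false hm, Bool.false_eq_true, if_false,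
        List.map_cons]
      rw [ih (s ++ [a])]
      simp

theorem pvSift_subset {q : List (Int × List Int)} :
    ∀ {s : PySem.Set Int} {e : Int × List Int}, e ∈ pvSift q s → e ∈ q := by
  induction q with
  | nil => intro s e h; simp [pvSift] at h
  | cons x rest ih =>
    intro s e h
    obtain ⟨a, t⟩ := x
    by_cases hm : a ∈ s
    · simp only [pvSift, (PySem.Set.contains_iff _ _).mpr hm, if_true] at h
      exact List.mem_cons_of_mem _ (ih h)
    · simp only [pvSift, pvContains_false hm, Bool.false_eq_true, if_false, List.mem_cons] at h
      rcases h with h | h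
      · exact h ▸ List.mem_cons_self
      · exact List.mem_cons_of_mem _ (ih h)

theorem pvSift_seen_nodup (q : List (Int × List Int)) :
    ∀ s : PySem.Set Int, s.Nodup → (s ++ (pvSift q s).map Prod.fst).Nodup := by
  induction q with
  | nil => intro s hs; simpa [pvSift]
  | cons e rest ih =>
    intro s hs
    obtain ⟨a, t⟩ := e
    by_cases hm : a ∈ s
    · simp only [pvSift, (PySem.Set.contains_iff _ _).mpr hm, if_true]
      exact ih s hs
    · simp only [pvSift, pvContains_false hm, Bool.false_eq_true, if_false, List.map_cons]
      have hnd : (s ++ [a]).Nodup := by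
        rw [List.nodup_append]
        exact ⟨hs, List.nodup_singleton _, by intro y hy b hb heq; rw [List.mem_singleton] at hb; exact hm (hb ▸ heq ▸ hy)⟩
      have := ih (s ++ [a]) hnd
      simpa using this

-- proof-side BFS: mark-on-enqueue, still carrying the press-count tuples (the bridge
-- between A's dequeue-filtered queue and B's parent-pointer queue)
def pvRunBE (goal : Int) (buttons_sets : List Int) (queue : List (Int × List Int))
    (seen : PySem.Set Int) : List Int :=
  match queue with
  | [] => []
  | (current, pressed) :: rest =>
    if current = goal then pressed
    else if hcap : pvCap ≤ seen.length then []
    else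
      pvRunBE goal buttons_sets
        (rest ++ pvSift (pvChildrenA buttons_sets current pressed) seen)
        (seen ++ (pvSift (pvChildrenA buttons_sets current pressed) seen).map Prod.fst)
termination_by (pvCap - seen.length, queue.length)
decreasing_by
  rcases pvSift (pvChildrenA buttons_sets current pressed) seen with _ | ⟨e, ks'⟩
  · simp only [List.map_nil, List.append_nil]
    exact Prod.Lex.right _ (by simp)
  · exact Prod.Lex.left _ _ (by simp only [List.length_append, List.length_map, List.length_cons]; omega)

-- ===== step 1: A's dequeue-time filtering equals the enqueue-filtered BFS =====
theorem pvSimAE (goal : Int) (buttons_sets : List Int)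
    (hbr : ∀ b ∈ buttons_sets, pvInR b) :
    ∀ (k : Nat) (QA : List (Int × List Int)) (VA : PySem.Set Int),
      pvCap ≤ VA.length + k →
      VA.Nodup →
      (∀ x ∈ VA, pvInR x) → (∀ e ∈ QA, pvInR (Prod.fst e)) →
      pvRunA goal buttons_sets QA VA
        = pvRunBE goal buttons_sets (pvSift QA VA) (VA ++ (pvSift QA VA).map Prod.fst) := by
  intro k
  induction k with
  | zero =>
    intro QA VA hk hnd hVAr hQAr
    exact absurd (pvLen_lt_cap VA hnd hVAr) (by omega)
  | succ k ihk =>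
  intro QA
  induction QA with
  | nil =>
    intro VA hk hnd hVAr hQAr
    simp only [pvSift]
    rw [pvRunA, pvRunBE]
  | cons head rest ih =>
    intro VA hk hnd hVAr hQAr
    obtain ⟨current, pressed⟩ := head
    by_cases hm : current ∈ VA
    · rw [pvRunA, dif_pos ((PySem.Set.contains_iff _ _).mpr hm)]
      have hsift : pvSift ((current, pressed) :: rest) VA = pvSift rest VA := by
        simp only [pvSift, (PySem.Set.contains_iff _ _).mpr hm, if_true]
      rw [hsift]
      exact ih VA hk hnd hVAr (fun e he => hQAr e (List.mem_cons_of_mem _ he))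
    · have hcf : PySem.Set.contains VA current = false := pvContains_false hm
      have hsift : pvSift ((current, pressed) :: rest) VA
          = (current, pressed) :: pvSift rest (VA ++ [current]) := by
        simp only [pvSift, hcf, Bool.false_eq_true, if_false]
      rw [pvRunA, dif_neg (fun hc => hm ((PySem.Set.contains_iff _ _).mp hc)), hsift]
      by_cases hg : current = goal
      · rw [if_pos hg, pvRunBE, if_pos hg]
      · have hcr : pvInR current := hQAr (current, pressed) List.mem_cons_self
        have hnd' : (VA ++ [current]).Nodup := by
          rw [List.nodup_append]
          exact ⟨hnd, List.nodup_singleton _, by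
            intro y hy b hb heq; rw [List.mem_singleton] at hb; exact hm (hb ▸ heq ▸ hy)⟩
        have hVAr' : ∀ x ∈ VA ++ [current], pvInR x := by
          intro x hx
          rcases List.mem_append.mp hx with h | h
          · exact hVAr x h
          · rw [List.mem_singleton] at h; exact h ▸ hcr
        have hSBnd : ((VA ++ [current]) ++ (pvSift rest (VA ++ [current])).map Prod.fst).Nodup :=
          pvSift_seen_nodup rest (VA ++ [current]) hnd'
        have hSBr : ∀ x ∈ (VA ++ [current]) ++ (pvSift rest (VA ++ [current])).map Prod.fst,
            pvInR x := by
          intro x hx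
          rcases List.mem_append.mp hx with h | h
          · exact hVAr' x h
          · rw [List.mem_map] at h
            obtain ⟨e, he, rfl⟩ := h
            exact hQAr e (List.mem_cons_of_mem _ (pvSift_subset he))
        have hSB : VA ++ ((current, pressed) :: pvSift rest (VA ++ [current])).map Prod.fst
            = (VA ++ [current]) ++ (pvSift rest (VA ++ [current])).map Prod.fst := by
          simp
        rw [if_neg hg, dif_neg (not_le.mpr (pvLen_lt_cap VA hnd hVAr)), pvRunBE, if_neg hg]
        rw [hSB] at *
        rw [dif_neg (not_le.mpr (pvLen_lt_cap _ hSBnd hSBr))]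
        have hQAr' : ∀ e ∈ rest ++ pvChildrenA buttons_sets current pressed,
            pvInR (Prod.fst e) := by
          intro e he
          rcases List.mem_append.mp he with h | h
          · exact hQAr e (List.mem_cons_of_mem _ h)
          · unfold pvChildrenA at h
            rw [List.mem_map] at h
            obtain ⟨ib, hib, rfl⟩ := h
            rw [PySem.List.mem_enumerate_iff] at hib
            obtain ⟨j, hj, rfl⟩ := hib
            exact pvInR_bxor hcr (hbr _ (List.getElem_mem hj))
        have hrec := ihk (rest ++ pvChildrenA buttons_sets current pressed) (VA ++ [current])
          (by simp only [List.length_append, List.length_singleton]; omega)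
          hnd' hVAr' hQAr'
        rw [PySem.Set.add_of_not_mem hm, hrec]
        rw [pvSift_append]
        simp

-- ===== rebuild lemmas =====
-- every stored parent pointer leads to 0 or to another key
def pvClosed (P : PySem.Dict Int (Int × Int)) : Prop :=
  ∀ e ∈ P.items, e.2.1 = 0 ∨ e.2.1 ∈ PySem.Dict.keys P

-- every stored button index is a Nat below n
def pvValIdx (n : Nat) (P : PySem.Dict Int (Int × Int)) : Prop :=
  ∀ e ∈ P.items, ∃ k : Nat, e.2.2 = (k : Int) ∧ k < n

theorem pvBump_comm (c : List Int) (i j : Nat) :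
    pvBump (pvBump c (i : Int)) (j : Int) = pvBump (pvBump c (j : Int)) (i : Int) := by
  by_cases hij : i = j
  · subst hij; rfl
  · simp only [pvBump, PySem.List.pySetD_natCast, PySem.List.pyGetD_natCast]
    have h1 : (c.set i (c.getD i 0 + 1)).getD j 0 = c.getD j 0 := by
      simp [List.getD, hij]
    have h2 : (c.set j (c.getD j 0 + 1)).getD i 0 = c.getD i 0 := by
      simp [List.getD, Ne.symm hij]
    rw [h1, h2, List.set_comm _ _ hij]

theorem pvRebuild_bump (n : Nat) (P : PySem.Dict Int (Int × Int)) (hvi : pvValIdx n P) :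
    ∀ (f : Nat) (s : Int) (c : List Int) (k : Nat),
      pvRebuild P f s (pvBump c (k : Int)) = pvBump (pvRebuild P f s c) (k : Int) := by
  intro f
  induction f with
  | zero => intro s c k; rfl
  | succ f ih =>
    intro s c k
    simp only [pvRebuild]
    by_cases hs : s = 0
    · rw [if_pos hs, if_pos hs]
    · rw [if_neg hs, if_neg hs]
      rcases h : PySem.Dict.get? P s with _ | pi
      · rfl
      · obtain ⟨m, hm, hmn⟩ := hvi (s, pi) (PySem.Dict.mem_items_of_get?_eq_some P h)
        simp only []
        rw [hm, pvBump_comm c k m, ih]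

theorem pvRebuild_insert_fresh (P : PySem.Dict Int (Int × Int)) (hcl : pvClosed P)
    (knew : Int) (hk : knew ∉ PySem.Dict.keys P) (v : Int × Int) :
    ∀ (f : Nat) (s : Int) (c : List Int), (s = 0 ∨ s ∈ PySem.Dict.keys P) →
      pvRebuild (PySem.Dict.insert P knew v) f s c = pvRebuild P f s c := by
  intro f
  induction f with
  | zero => intro s c _; rfl
  | succ f ih =>
    intro s c hs
    simp only [pvRebuild]
    by_cases hs0 : s = 0
    · rw [if_pos hs0, if_pos hs0]
    · rw [if_neg hs0, if_neg hs0]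
      have hmem : s ∈ PySem.Dict.keys P := hs.resolve_left hs0
      have hne : s ≠ knew := fun h => hk (h ▸ hmem)
      rw [PySem.Dict.get?_insert_of_ne P v hne]
      rcases h : PySem.Dict.get? P s with _ | pi
      · rfl
      · exact ih pi.1 _ (hcl (s, pi) (PySem.Dict.mem_items_of_get?_eq_some P h))

-- ===== step 2: the inner for-loop of B computes the sift of the child list =====
theorem pvInner_spec (goal : Int) (n : Nat) (current : Int) (t : List Int) :
    ∀ (l : List (Int × Int)) (qB : List Int) (S : PySem.Set Int)
      (P : PySem.Dict Int (Int × Int)),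
      (∀ ib ∈ l, ∃ k : Nat, ib.1 = (k : Int) ∧ k < n) →
      S = 0 :: PySem.Dict.keys P →
      S.Nodup →
      pvClosed P → pvValIdx n P →
      (current = 0 ∨ current ∈ PySem.Dict.keys P) →
      (∀ f, PySem.Dict.size P ≤ f → pvRebuild P f current (List.replicate n 0) = t) →
      goal ∉ S →
      ((goal ∈ (pvSift (l.map (fun ib => (PySem.Int.bxor current ib.2, pvBump t ib.1))) S).map Prod.fst →
          ∃ tg, (goal, tg) ∈ pvSift (l.map (fun ib => (PySem.Int.bxor current ib.2, pvBump t ib.1))) S ∧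
            pvInnerB goal n current l qB S P = Sum.inl tg)
        ∧ (goal ∉ (pvSift (l.map (fun ib => (PySem.Int.bxor current ib.2, pvBump t ib.1))) S).map Prod.fst →
          ∃ P', pvInnerB goal n current l qB S P
              = Sum.inr (qB ++ (pvSift (l.map (fun ib => (PySem.Int.bxor current ib.2, pvBump t ib.1))) S).map Prod.fst,
                  S ++ (pvSift (l.map (fun ib => (PySem.Int.bxor current ib.2, pvBump t ib.1))) S).map Prod.fst, P') ∧
            PySem.Dict.keys P' = PySem.Dict.keys P ++ (pvSift (l.map (fun ib => (PySem.Int.bxor current ib.2, pvBump t ib.1))) S).map Prod.fst ∧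
            pvClosed P' ∧ pvValIdx n P' ∧
            (∀ s, (s = 0 ∨ s ∈ PySem.Dict.keys P) → ∀ (f : Nat) (c : List Int),
              pvRebuild P' f s c = pvRebuild P f s c) ∧
            (∀ e ∈ pvSift (l.map (fun ib => (PySem.Int.bxor current ib.2, pvBump t ib.1))) S,
              ∀ f, PySem.Dict.size P' ≤ f → pvRebuild P' f e.1 (List.replicate n 0) = e.2))) := by
  intro l
  induction l with
  | nil =>
    intro qB S P hl hSP hnd hcl hvi hcur hreb hgS
    constructor
    · intro hgoal; simp [pvSift] at hgoal
    · intro _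
      refine ⟨P, ?_, ?_, hcl, hvi, fun s _ f c => rfl, ?_⟩
      · simp [pvSift, pvInnerB]
      · simp [pvSift]
      · intro e he; simp [pvSift] at he
  | cons ib rest ihl =>
    intro qB S P hl hSP hnd hcl hvi hcur hreb hgS
    obtain ⟨m, hm, hmn⟩ := hl ib List.mem_cons_self
    by_cases hseen : PySem.Int.bxor current ib.2 ∈ S
    · -- child already seen: both the sift and the loop skip it
      have hc : PySem.Set.contains S (PySem.Int.bxor current ib.2) = true :=
        (PySem.Set.contains_iff _ _).mpr hseen
      have hsift : pvSift (((ib :: rest).map (fun ib => (PySem.Int.bxor current ib.2, pvBump t ib.1)))) S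
          = pvSift (rest.map (fun ib => (PySem.Int.bxor current ib.2, pvBump t ib.1))) S := by
        simp only [List.map_cons, pvSift, hc, if_true]
      have hrun : pvInnerB goal n current (ib :: rest) qB S P
          = pvInnerB goal n current rest qB S P := by
        simp only [pvInnerB, hc, if_true]
      rw [hsift, hrun]
      exact ihl qB S P (fun x hx => hl x (List.mem_cons_of_mem _ hx)) hSP hnd hcl hvi hcur hreb hgS
    · -- fresh child
      have hc : PySem.Set.contains S (PySem.Int.bxor current ib.2) = false := pvContains_false hseen
      have h0S : (0 : Int) ∈ S := by rw [hSP]; exact List.mem_cons_self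
      have hnxt0 : PySem.Int.bxor current ib.2 ≠ 0 := fun h => hseen (h ▸ h0S)
      have hkeys : PySem.Int.bxor current ib.2 ∉ PySem.Dict.keys P := fun h =>
        hseen (by rw [hSP]; exact List.mem_cons_of_mem _ h)
      have hncont : PySem.Dict.contains P (PySem.Int.bxor current ib.2) = false := by
        simp [PySem.Dict.contains_eq_decide_mem_keys, hkeys]
      have hkeysP' : PySem.Dict.keys (PySem.Dict.insert P (PySem.Int.bxor current ib.2) (current, ib.1))
          = PySem.Dict.keys P ++ [PySem.Int.bxor current ib.2] :=
        PySem.Dict.keys_insert_of_not_contains _ _ hncont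
      have hitemsP' : (PySem.Dict.insert P (PySem.Int.bxor current ib.2) (current, ib.1)).items
          = P.items ++ [(PySem.Int.bxor current ib.2, (current, ib.1))] :=
        PySem.Dict.items_insert_of_not_contains _ _ hncont
      have hsizekeys : ∀ Q : PySem.Dict Int (Int × Int), PySem.Dict.size Q = (PySem.Dict.keys Q).length := by
        intro Q; simp [PySem.Dict.size, PySem.Dict.keys]
      have hsizeP' : PySem.Dict.size (PySem.Dict.insert P (PySem.Int.bxor current ib.2) (current, ib.1))
          = PySem.Dict.size P + 1 := by
        rw [hsizekeys, hsizekeys, hkeysP']; simp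
      have hclP' : pvClosed (PySem.Dict.insert P (PySem.Int.bxor current ib.2) (current, ib.1)) := by
        intro e he
        rw [hitemsP'] at he
        rcases List.mem_append.mp he with h | h
        · rcases hcl e h with h' | h'
          · exact Or.inl h'
          · exact Or.inr (by rw [hkeysP']; exact List.mem_append_left _ h')
        · rw [List.mem_singleton] at h
          subst h
          rcases hcur with h' | h'
          · exact Or.inl h'
          · exact Or.inr (by rw [hkeysP']; exact List.mem_append_left _ h')
      have hviP' : pvValIdx n (PySem.Dict.insert P (PySem.Int.bxor current ib.2) (current, ib.1)) := by
        intro e he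
        rw [hitemsP'] at he
        rcases List.mem_append.mp he with h | h
        · exact hvi e h
        · rw [List.mem_singleton] at h
          subst h
          exact ⟨m, hm, hmn⟩
      -- the fresh child's reconstruction equals the tuple A would have carried
      have hrebC : ∀ f, PySem.Dict.size (PySem.Dict.insert P (PySem.Int.bxor current ib.2) (current, ib.1)) ≤ f →
          pvRebuild (PySem.Dict.insert P (PySem.Int.bxor current ib.2) (current, ib.1)) f
            (PySem.Int.bxor current ib.2) (List.replicate n 0) = pvBump t ib.1 := by
        intro f hf
        rw [hsizeP'] at hf
        obtain ⟨f', rfl⟩ : ∃ f', f = f' + 1 := ⟨f - 1, by omega⟩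
        simp only [pvRebuild, if_neg hnxt0, PySem.Dict.get?_insert_self]
        rw [pvRebuild_insert_fresh P hcl _ hkeys _ f' current _ hcur]
        rw [hm, pvRebuild_bump n P hvi, hreb f' (by omega)]
      have hstab1 : ∀ s, (s = 0 ∨ s ∈ PySem.Dict.keys P) → ∀ (f : Nat) (c : List Int),
          pvRebuild (PySem.Dict.insert P (PySem.Int.bxor current ib.2) (current, ib.1)) f s c
            = pvRebuild P f s c := fun s hs f c =>
        pvRebuild_insert_fresh P hcl _ hkeys _ f s c hs
      have hsift : pvSift (((ib :: rest).map (fun ib => (PySem.Int.bxor current ib.2, pvBump t ib.1)))) S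
          = (PySem.Int.bxor current ib.2, pvBump t ib.1)
            :: pvSift (rest.map (fun ib => (PySem.Int.bxor current ib.2, pvBump t ib.1))) (S ++ [PySem.Int.bxor current ib.2]) := by
        simp only [List.map_cons, pvSift, hc, Bool.false_eq_true, if_false]
      by_cases hg : PySem.Int.bxor current ib.2 = goal
      · -- the fresh child IS the goal: the loop returns the reconstruction
        have hrun : pvInnerB goal n current (ib :: rest) qB S P
            = Sum.inl (pvBump t ib.1) := by
          simp only [pvInnerB, hc, Bool.false_eq_true, if_false, if_pos hg]
          rw [hrebC _ (by omega)]
        constructor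
        · intro _
          exact ⟨pvBump t ib.1, by rw [hsift, hg]; exact List.mem_cons_self, hrun⟩
        · intro hno
          exact absurd (by
            rw [hsift]
            simp only [List.map_cons]
            exact List.mem_cons.mpr (Or.inl hg.symm)) hno
      · -- fresh non-goal child: enqueue it and recurse
        have hnd' : (S ++ [PySem.Int.bxor current ib.2]).Nodup := by
          rw [List.nodup_append]
          exact ⟨hnd, List.nodup_singleton _, by
            intro y hy b hb heq; rw [List.mem_singleton] at hb; exact hseen (hb ▸ heq ▸ hy)⟩
        have hSP' : S ++ [PySem.Int.bxor current ib.2]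
            = 0 :: PySem.Dict.keys (PySem.Dict.insert P (PySem.Int.bxor current ib.2) (current, ib.1)) := by
          rw [hSP, hkeysP']; simp
        have hgS' : goal ∉ S ++ [PySem.Int.bxor current ib.2] := by
          intro h
          rcases List.mem_append.mp h with h | h
          · exact hgS h
          · rw [List.mem_singleton] at h; exact hg (h ▸ rfl)
        have hcur' : current = 0 ∨ current ∈ PySem.Dict.keys (PySem.Dict.insert P (PySem.Int.bxor current ib.2) (current, ib.1)) := by
          rcases hcur with h | h
          · exact Or.inl h
          · exact Or.inr (by rw [hkeysP']; exact List.mem_append_left _ h)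
        have hreb' : ∀ f, PySem.Dict.size (PySem.Dict.insert P (PySem.Int.bxor current ib.2) (current, ib.1)) ≤ f →
            pvRebuild (PySem.Dict.insert P (PySem.Int.bxor current ib.2) (current, ib.1)) f current (List.replicate n 0) = t := by
          intro f hf
          rw [hstab1 current hcur]
          exact hreb f (by omega)
        have hrun : pvInnerB goal n current (ib :: rest) qB S P
            = pvInnerB goal n current rest (qB ++ [PySem.Int.bxor current ib.2])
                (S ++ [PySem.Int.bxor current ib.2])
                (PySem.Dict.insert P (PySem.Int.bxor current ib.2) (current, ib.1)) := by
          simp only [pvInnerB, hc, Bool.false_eq_true, if_false, if_neg hg]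
          rw [PySem.Set.add_of_not_mem hseen]
        obtain ⟨ihA, ihB⟩ := ihl (qB ++ [PySem.Int.bxor current ib.2])
          (S ++ [PySem.Int.bxor current ib.2])
          (PySem.Dict.insert P (PySem.Int.bxor current ib.2) (current, ib.1))
          (fun x hx => hl x (List.mem_cons_of_mem _ hx)) hSP' hnd' hclP' hviP' hcur' hreb' hgS'
        rw [hsift, hrun]
        constructor
        · intro hmem
          have hmem' : goal ∈ (pvSift (rest.map (fun ib => (PySem.Int.bxor current ib.2, pvBump t ib.1)))
              (S ++ [PySem.Int.bxor current ib.2])).map Prod.fst := by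
            rcases List.mem_cons.mp (by simpa only [List.map_cons] using hmem) with h | h
            · exact absurd h.symm hg
            · exact h
          obtain ⟨tg, htg, hrunl⟩ := ihA hmem'
          exact ⟨tg, List.mem_cons_of_mem _ htg, hrunl⟩
        · intro hno
          have hno' : goal ∉ (pvSift (rest.map (fun ib => (PySem.Int.bxor current ib.2, pvBump t ib.1)))
              (S ++ [PySem.Int.bxor current ib.2])).map Prod.fst := by
            intro h
            exact hno (by simp only [List.map_cons]; exact List.mem_cons_of_mem _ h)
          obtain ⟨P'', hrunr, hk'', hcl'', hvi'', hstab'', hrebks''⟩ := ihB hno'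
          have hsz'' : PySem.Dict.size (PySem.Dict.insert P (PySem.Int.bxor current ib.2) (current, ib.1))
              ≤ PySem.Dict.size P'' := by
            rw [hsizekeys, hsizekeys, hk'']; simp
          refine ⟨P'', ?_, ?_, hcl'', hvi'', ?_, ?_⟩
          · rw [hrunr]; simp
          · rw [hk'', hkeysP']; simp
          · intro s hs f c
            have hs' : s = 0 ∨ s ∈ PySem.Dict.keys (PySem.Dict.insert P (PySem.Int.bxor current ib.2) (current, ib.1)) := by
              rcases hs with h | h
              · exact Or.inl h
              · exact Or.inr (by rw [hkeysP']; exact List.mem_append_left _ h)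
            rw [hstab'' s hs' f c, hstab1 s hs f c]
          · intro e he f hf
            rcases List.mem_cons.mp he with h | h
            · subst h
              have : PySem.Int.bxor current ib.2 ∈ PySem.Dict.keys (PySem.Dict.insert P (PySem.Int.bxor current ib.2) (current, ib.1)) := by
                rw [hkeysP']; simp
              rw [hstab'' _ (Or.inr this) f _]
              exact hrebC f (by omega)
            · exact hrebks'' e h f hf

-- ===== draining the enqueue-filtered BFS once the goal sits in its queue =====
theorem pvDrain (goal : Int) (buttons_sets : List Int)
    (hbr : ∀ b ∈ buttons_sets, pvInR b) :
    ∀ (pre : List (Int × List Int)) (t : List Int) (post : List (Int × List Int))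
      (S : PySem.Set Int),
      S.Nodup → (∀ x ∈ S, pvInR x) → goal ∈ S →
      (∀ e ∈ pre, Prod.fst e ≠ goal) → (∀ e ∈ pre, pvInR (Prod.fst e)) →
      pvRunBE goal buttons_sets (pre ++ (goal, t) :: post) S = t := by
  intro pre
  induction pre with
  | nil =>
    intro t post S hnd hinR hgS hpre hpreR
    rw [List.nil_append, pvRunBE, if_pos rfl]
  | cons e pre ih =>
    intro t post S hnd hinR hgS hpre hpreR
    obtain ⟨c, p⟩ := e
    have hcg : c ≠ goal := hpre (c, p) List.mem_cons_self
    have hcr : pvInR c := hpreR (c, p) List.mem_cons_self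
    have hkids : ∀ e ∈ pvSift (pvChildrenA buttons_sets c p) S, pvInR (Prod.fst e) := by
      intro e he
      have hmem := pvSift_subset he
      unfold pvChildrenA at hmem
      rw [List.mem_map] at hmem
      obtain ⟨ib, hib, rfl⟩ := hmem
      rw [PySem.List.mem_enumerate_iff] at hib
      obtain ⟨k, hk, rfl⟩ := hib
      exact pvInR_bxor hcr (hbr _ (List.getElem_mem hk))
    rw [List.cons_append, pvRunBE, if_neg hcg,
      dif_neg (not_le.mpr (pvLen_lt_cap S hnd hinR))]
    have hassoc : (pre ++ (goal, t) :: post) ++ pvSift (pvChildrenA buttons_sets c p) S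
        = pre ++ (goal, t) :: (post ++ pvSift (pvChildrenA buttons_sets c p) S) := by
      simp
    rw [hassoc]
    refine ih t _ (S ++ (pvSift (pvChildrenA buttons_sets c p) S).map Prod.fst)
      (pvSift_seen_nodup _ S hnd) ?_ (List.mem_append_left _ hgS)
      (fun e he => hpre e (List.mem_cons_of_mem _ he))
      (fun e he => hpreR e (List.mem_cons_of_mem _ he))
    intro x hx
    rcases List.mem_append.mp hx with h | h
    · exact hinR x h
    · rw [List.mem_map] at h
      obtain ⟨e, he, rfl⟩ := h
      exact hkids e he

-- ===== step 3: the enqueue-filtered BFS equals B's parent-pointer BFS =====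
theorem pvSimEB (goal : Int) (buttons_sets : List Int)
    (hbr : ∀ b ∈ buttons_sets, pvInR b) :
    ∀ (k : Nat) (Q : List (Int × List Int)) (S : PySem.Set Int)
      (P : PySem.Dict Int (Int × Int)),
      pvCap ≤ S.length + k →
      S.Nodup → (∀ x ∈ S, pvInR x) →
      S = 0 :: PySem.Dict.keys P →
      pvClosed P → pvValIdx buttons_sets.length P →
      goal ∉ S →
      (∀ e ∈ Q, Prod.fst e ∈ S) →
      (∀ e ∈ Q, ∀ f, PySem.Dict.size P ≤ f →
        pvRebuild P f (Prod.fst e) (List.replicate buttons_sets.length 0) = Prod.snd e) →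
      pvRunBE goal buttons_sets Q S = pvRunB goal buttons_sets (Q.map Prod.fst) S P := by
  intro k
  induction k with
  | zero =>
    intro Q S P hk hnd hinR hSP hcl hvi hgS hQS hQreb
    exact absurd (pvLen_lt_cap S hnd hinR) (by omega)
  | succ k ihk =>
  intro Q
  induction Q with
  | nil =>
    intro S P hk hnd hinR hSP hcl hvi hgS hQS hQreb
    simp only [List.map_nil]
    rw [pvRunBE, pvRunB]
  | cons head rest ih =>
    intro S P hk hnd hinR hSP hcl hvi hgS hQS hQreb
    obtain ⟨current, t⟩ := head
    have hcS : current ∈ S := hQS _ List.mem_cons_self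
    have hcg : current ≠ goal := fun h => hgS (h ▸ hcS)
    have hcap := not_le.mpr (pvLen_lt_cap S hnd hinR)
    have hcr : pvInR current := hinR current hcS
    have hch : (PySem.List.enumerate buttons_sets).map
        (fun ib => (PySem.Int.bxor current ib.2, pvBump t ib.1))
        = pvChildrenA buttons_sets current t := rfl
    have hl : ∀ ib ∈ PySem.List.enumerate buttons_sets,
        ∃ j : Nat, ib.1 = (j : Int) ∧ j < buttons_sets.length := by
      intro ib hib
      rw [PySem.List.mem_enumerate_iff] at hib
      obtain ⟨j, hj, rfl⟩ := hib
      exact ⟨j, by simp, hj⟩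
    have hcur : current = 0 ∨ current ∈ PySem.Dict.keys P := by
      rw [hSP] at hcS
      rcases List.mem_cons.mp hcS with h | h
      · exact Or.inl h
      · exact Or.inr h
    have hkidsR : ∀ e ∈ pvSift (pvChildrenA buttons_sets current t) S, pvInR (Prod.fst e) := by
      intro e he
      have hmem := pvSift_subset he
      unfold pvChildrenA at hmem
      rw [List.mem_map] at hmem
      obtain ⟨ib, hib, rfl⟩ := hmem
      rw [PySem.List.mem_enumerate_iff] at hib
      obtain ⟨j, hj, rfl⟩ := hib
      exact pvInR_bxor hcr (hbr _ (List.getElem_mem hj))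
    have hS'nd : (S ++ (pvSift (pvChildrenA buttons_sets current t) S).map Prod.fst).Nodup :=
      pvSift_seen_nodup _ S hnd
    have hS'R : ∀ x ∈ S ++ (pvSift (pvChildrenA buttons_sets current t) S).map Prod.fst, pvInR x := by
      intro x hx
      rcases List.mem_append.mp hx with h | h
      · exact hinR x h
      · rw [List.mem_map] at h
        obtain ⟨e, he, rfl⟩ := h
        exact hkidsR e he
    have hsizekeys : ∀ Q' : PySem.Dict Int (Int × Int),
        PySem.Dict.size Q' = (PySem.Dict.keys Q').length := by
      intro Q'; simp [PySem.Dict.size, PySem.Dict.keys]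
    have hspec := pvInner_spec goal buttons_sets.length current t
      (PySem.List.enumerate buttons_sets) (rest.map Prod.fst) S P hl hSP hnd hcl hvi hcur
      (hQreb (current, t) List.mem_cons_self) hgS
    rw [hch] at hspec
    rw [pvRunBE, if_neg hcg, dif_neg hcap]
    simp only [List.map_cons]
    rw [pvRunB, dif_neg hcap]
    by_cases hgin : goal ∈ (pvSift (pvChildrenA buttons_sets current t) S).map Prod.fst
    · -- the goal was just enqueued: B returns the reconstruction, BE drains to the same entry
      obtain ⟨tg, htg, hrun⟩ := hspec.1 hgin
      obtain ⟨ks1, ks2, hks⟩ := List.append_of_mem htg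
      have hdr : pvRunBE goal buttons_sets
          (rest ++ pvSift (pvChildrenA buttons_sets current t) S)
          (S ++ (pvSift (pvChildrenA buttons_sets current t) S).map Prod.fst) = tg := by
        rw [hks] at hS'nd hS'R hgin hkidsR ⊢
        have hassoc : rest ++ (ks1 ++ (goal, tg) :: ks2)
            = (rest ++ ks1) ++ (goal, tg) :: ks2 := by simp
        rw [hassoc]
        have hks1g : ∀ e ∈ ks1, Prod.fst e ≠ goal := by
          intro e he heq
          have hndk : ((ks1 ++ (goal, tg) :: ks2).map Prod.fst).Nodup :=
            (List.nodup_append.mp hS'nd).2.1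
          rw [List.map_append, List.map_cons] at hndk
          rw [List.nodup_append] at hndk
          exact (hndk.2.2 (Prod.fst e) (List.mem_map_of_mem he) goal List.mem_cons_self) heq
        refine pvDrain goal buttons_sets hbr (rest ++ ks1) tg ks2 _ hS'nd hS'R
          (List.mem_append_right _ hgin) ?_ ?_
        · intro e he
          rcases List.mem_append.mp he with h | h
          · exact fun heq => hgS (heq ▸ hQS e (List.mem_cons_of_mem _ h))
          · exact hks1g e h
        · intro e he
          rcases List.mem_append.mp he with h | h
          · exact hinR _ (hQS e (List.mem_cons_of_mem _ h))
          · exact hkidsR e (List.mem_append_left _ h)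
      rw [hdr, hrun]
    · -- no goal among the new children: both BFSs take one synchronized step
      obtain ⟨P', hrun, hk', hcl', hvi', hstab, hrebks⟩ := hspec.2 hgin
      have hszP' : PySem.Dict.size P ≤ PySem.Dict.size P' := by
        rw [hsizekeys, hsizekeys, hk']; simp
      have hSP' : S ++ (pvSift (pvChildrenA buttons_sets current t) S).map Prod.fst
          = 0 :: PySem.Dict.keys P' := by
        rw [hk', hSP]; simp
      have hgS' : goal ∉ S ++ (pvSift (pvChildrenA buttons_sets current t) S).map Prod.fst := by
        intro h
        rcases List.mem_append.mp h with h | h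
        · exact hgS h
        · exact hgin h
      have hQS' : ∀ e ∈ rest ++ pvSift (pvChildrenA buttons_sets current t) S,
          Prod.fst e ∈ S ++ (pvSift (pvChildrenA buttons_sets current t) S).map Prod.fst := by
        intro e he
        rcases List.mem_append.mp he with h | h
        · exact List.mem_append_left _ (hQS e (List.mem_cons_of_mem _ h))
        · exact List.mem_append_right _ (List.mem_map_of_mem h)
      have hQreb' : ∀ e ∈ rest ++ pvSift (pvChildrenA buttons_sets current t) S,
          ∀ f, PySem.Dict.size P' ≤ f →
          pvRebuild P' f (Prod.fst e) (List.replicate buttons_sets.length 0) = Prod.snd e := by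
        intro e he f hf
        rcases List.mem_append.mp he with h | h
        · have hs : Prod.fst e = 0 ∨ Prod.fst e ∈ PySem.Dict.keys P := by
            have := hQS e (List.mem_cons_of_mem _ h)
            rw [hSP] at this
            rcases List.mem_cons.mp this with h' | h'
            · exact Or.inl h'
            · exact Or.inr h'
          rw [hstab _ hs]
          exact hQreb e (List.mem_cons_of_mem _ h) f (by omega)
        · exact hrebks e h f hf
      have hstep : pvRunBE goal buttons_sets
          (rest ++ pvSift (pvChildrenA buttons_sets current t) S)
          (S ++ (pvSift (pvChildrenA buttons_sets current t) S).map Prod.fst)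
          = pvRunB goal buttons_sets
              (rest.map Prod.fst ++ (pvSift (pvChildrenA buttons_sets current t) S).map Prod.fst)
              (S ++ (pvSift (pvChildrenA buttons_sets current t) S).map Prod.fst) P' := by
        rcases hks : pvSift (pvChildrenA buttons_sets current t) S with _ | ⟨x, ks'⟩
        · -- nothing new: the queue just shrank
          rw [hks] at hSP' hgS' hQS' hQreb'
          simp only [List.map_nil, List.append_nil] at hSP' hgS' hQS' hQreb' ⊢
          exact ih S P' hk hnd hinR hSP' hcl' hvi' hgS' hQS' hQreb'
        · -- at least one new state: the seen set grew
          rw [← hks]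
          have := ihk (rest ++ pvSift (pvChildrenA buttons_sets current t) S)
            (S ++ (pvSift (pvChildrenA buttons_sets current t) S).map Prod.fst) P'
            (by
              rw [List.length_append, List.length_map, hks]
              simp only [List.length_cons]
              omega)
            hS'nd hS'R hSP' hcl' hvi' hgS' hQS' hQreb'
          rw [this, List.map_append]
      rw [hstep, hrun]

-- ===== VERDICT (by name: the statement is the Claim_ definition above) =====
theorem find_the_lowest_buttons_press_count_spec : Claim_equal_find_the_lowest_buttons_press_count := by
  intro goal buttons_sets hDom _hPre
  unfold Spec_find_the_lowest_buttons_press_count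
  unfold find_the_lowest_buttons_press_count find_the_lowest_buttons_press_count_alt
  have hbr : ∀ b ∈ buttons_sets, pvInR b := by
    intro b hb
    unfold Dom_find_the_lowest_buttons_press_count at hDom
    rw [Bool.and_eq_true, List.all_eq_true] at hDom
    have := hDom.2 b hb
    unfold pvDomInt at this
    rw [decide_eq_true_eq] at this
    exact ⟨by omega, by omega⟩
  by_cases hg0 : goal = 0
  · subst hg0
    rw [if_pos rfl, pvRunA, dif_neg (by simp [PySem.Set.empty]), if_pos rfl]
  · rw [if_neg hg0]
    have hsift0 : pvSift [((0 : Int), List.replicate buttons_sets.length 0)] PySem.Set.empty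
        = [((0 : Int), List.replicate buttons_sets.length 0)] := by
      simp [pvSift, PySem.Set.empty]
    have h1 := pvSimAE goal buttons_sets hbr pvCap
      [((0 : Int), List.replicate buttons_sets.length 0)] PySem.Set.empty
      (by simp [PySem.Set.empty]) (by simp [PySem.Set.empty]) (by simp [PySem.Set.empty])
      (by
        intro e he
        rw [List.mem_singleton] at he
        subst he
        exact ⟨by norm_num, by norm_num⟩)
    rw [hsift0] at h1
    have h2 := pvSimEB goal buttons_sets hbr pvCap
      [((0 : Int), List.replicate buttons_sets.length 0)] [0] PySem.Dict.empty
      (by simp)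
      (by simp) (by intro x hx; rw [List.mem_singleton] at hx; subst hx; exact ⟨by norm_num, by norm_num⟩)
      (by simp [PySem.Dict.keys_empty])
      (by intro e he; simp [PySem.Dict.empty] at he)
      (by intro e he; simp [PySem.Dict.empty] at he)
      (by intro h; rw [List.mem_singleton] at h; exact hg0 h)
      (by intro e he; rw [List.mem_singleton] at he; subst he; simp)
      (by
        intro e he f hf
        rw [List.mem_singleton] at he
        subst he
        cases f with
        | zero => rfl
        | succ f => simp [pvRebuild])
    simp only [List.map_cons, List.map_nil] at h2
    simp only [PySem.Set.empty, List.map_cons, List.map_nil, List.nil_append] at h1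
    show pvRunA goal buttons_sets [(0, List.replicate buttons_sets.length 0)] []
        = pvRunB goal buttons_sets [0] [0] PySem.Dict.empty
    rw [h1, h2]
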